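-- pv_equiv track=rewrite | github.com/KChen-lab/Monopogen | src/bamProcess.py | sort_chr
-- ===== SOURCE A (Python) =====
-- def sort_chr(chr_lst):
-- 	# sort chr IDs from 1...22
-- 	chr_lst_sort = []
-- 	for i in range(1, 23):
-- 		i = str(i)
-- 		if  i in chr_lst:
-- 			chr_lst_sort.append(i)
-- 		i_chr = "chr"+i
-- 		if  i_chr in chr_lst:
-- 			chr_lst_sort.append(i_chr)
-- 	chr_lst = chr_lst_sort
-- 	return chr_lst
-- ===== SOURCE B (Python) =====
-- def sort_chr(chr_lst):
--     # idiomatic rewrite: filter the input to the valid chromosome IDs once,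
--     # then sort by (numeric value, 'chr'-prefix flag) encoded as a single rank
--     valid = set()
--     for i in range(1, 23):
--         valid.add(str(i))
--         valid.add("chr" + str(i))
--     present = set(chr_lst) & valid
--     def rank(s):
--         return 2 * int(s[3:]) + 1 if s.startswith("chr") else 2 * int(s)
--     return sorted(present, key=rank)
-- ===== Notes on version B (the rewrite author's own statement) =====
-- stated objective: idiomatic
-- what changed: Replaces the fixed 1..22 scan with two list-membership tests per number by a single set intersection of the input with the valid-ID set followed by one sort keyed on (numeric value, chr-prefix flag) encoded as one integer rank.
import Mathlib
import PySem

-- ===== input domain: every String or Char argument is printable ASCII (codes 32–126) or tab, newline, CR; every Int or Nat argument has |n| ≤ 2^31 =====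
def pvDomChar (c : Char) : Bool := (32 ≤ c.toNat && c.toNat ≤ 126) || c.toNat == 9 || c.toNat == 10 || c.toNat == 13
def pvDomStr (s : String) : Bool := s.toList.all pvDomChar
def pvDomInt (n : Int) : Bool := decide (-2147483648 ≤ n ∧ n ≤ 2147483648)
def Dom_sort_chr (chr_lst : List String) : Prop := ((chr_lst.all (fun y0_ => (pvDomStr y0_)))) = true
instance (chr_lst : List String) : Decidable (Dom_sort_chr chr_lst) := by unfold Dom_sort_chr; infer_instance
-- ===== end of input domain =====

-- B replaces A's fixed scan of 1..22 with membership tests by one set intersection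
-- with the valid-ID set followed by a keyed sort (objective: idiomatic).

-- ===== PORT A =====
def sort_chr (chr_lst : List String) : List String :=
  let chr_lst_sort : List String :=
    (PySem.List.pyRange 1 23 1).foldl (fun acc i =>
      let s := PySem.Int.toStr i
      let acc := if s ∈ chr_lst then acc ++ [s] else acc
      let i_chr := "chr" ++ s
      if i_chr ∈ chr_lst then acc ++ [i_chr] else acc) []
  chr_lst_sort

-- ===== PORT B =====
-- the valid-ID set built by B's loop over range(1, 23)
def pvValid : PySem.Set String :=
  (PySem.List.pyRange 1 23 1).foldl (fun v i =>
    PySem.Set.add (PySem.Set.add v (PySem.Int.toStr i)) ("chr" ++ PySem.Int.toStr i))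
    PySem.Set.empty

-- B's sort key; rank is only applied to valid IDs, on which int() cannot raise,
-- so the unreachable ValueError branch of int() is rendered as getD 0
def pvRank (s : String) : Int :=
  if PySem.Str.startswith s "chr" then
    2 * (PySem.Int.ofStr? (PySem.Str.slice s (some 3) none)).getD 0 + 1
  else
    2 * (PySem.Int.ofStr? s).getD 0

def sort_chr_alt (chr_lst : List String) : List String :=
  PySem.List.sorted (PySem.Set.inter (PySem.Set.ofList chr_lst) pvValid) pvRank

-- ===== PRECONDITION & SPEC =====
def Spec_sort_chr (chr_lst : List String) (out : List String) : Prop := out = sort_chr_alt chr_lst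
instance (chr_lst : List String) (out : List String) : Decidable (Spec_sort_chr chr_lst out) := by unfold Spec_sort_chr; infer_instance

-- ===== CLAIM (what is proved, stated in full; the proofs are below) =====
def Claim_equal_sort_chr : Prop := ∀ (chr_lst : List String), Dom_sort_chr chr_lst → Spec_sort_chr chr_lst (sort_chr chr_lst)

-- ===== LEMMAS AND PROOFS =====
set_option maxRecDepth 16384

-- pvValid, as a list, is the canonical interleaved enumeration "1","chr1","2","chr2",…
theorem pvValid_flat : (pvValid : List String) =
    (PySem.List.pyRange 1 23 1).flatMap (fun i => [PySem.Int.toStr i, "chr" ++ PySem.Int.toStr i]) := by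
  decide

theorem pvValid_nodup : (pvValid : List String).Nodup := by decide

theorem pvValid_pairwise : (pvValid : List String).Pairwise (fun a b => pvRank a < pvRank b) := by
  decide

-- A's loop is: filter the canonical enumeration by membership in the input
theorem sortA_eq (lst : List String) :
    sort_chr lst = (pvValid : List String).filter (fun s => decide (s ∈ lst)) := by
  unfold sort_chr
  rw [PySem.List.foldl_congr_mem' _ _
      (fun acc i => acc ++ ([PySem.Int.toStr i, "chr" ++ PySem.Int.toStr i].filter
        (fun s => decide (s ∈ lst)))) _ ?_]
  · rw [PySem.List.foldl_append_eq_flatMap, pvValid_flat, List.filter_flatMap]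
    simp
  · intro i _ acc
    by_cases h1 : PySem.Int.toStr i ∈ lst <;>
      by_cases h2 : ("chr" ++ PySem.Int.toStr i) ∈ lst <;>
        simp [List.filter, h1, h2]

-- B's sorted intersection equals the same filter of the canonical enumeration
theorem sortB_eq (lst : List String) :
    sort_chr_alt lst = (pvValid : List String).filter (fun s => decide (s ∈ lst)) := by
  unfold sort_chr_alt
  apply PySem.List.sorted_eq_of_perm_of_pairwise_lt
  · apply (List.perm_ext_iff_of_nodup (pvValid_nodup.filter _)
      (PySem.Set.nodup_inter _ _ (PySem.Set.nodup_ofList lst))).mpr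
    intro a
    simp only [List.mem_filter, PySem.Set.mem_inter, PySem.Set.mem_ofList, decide_eq_true_eq]
    tauto
  · exact pvValid_pairwise.sublist (List.filter_sublist)

-- ===== VERDICT (by name: the statement is the Claim_ definition above) =====
theorem sort_chr_spec : Claim_equal_sort_chr := by
  intro lst _
  unfold Spec_sort_chr
  rw [sortA_eq, sortB_eq]
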